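-- pv_equiv track=rewrite | github.com/Jss-on/astrobot | webactions.py | check_and_return
-- ===== SOURCE A (Python) =====
-- def check_and_return(elements):
--     # Define the specific elements to check
--     specific_elements = ["BDPACK-TR", "PACKLABEL", "TAPEREEL"]
--
--     # Check if there's an element that is not in specific_elements
--     for element in elements:
--         if element not in specific_elements:
--             return element
--
--     # If no such element, check if "PACKLABEL" exists
--     if "PACKLABEL" in elements:
--         return "PACKLABEL"
--
--     # If "PACKLABEL" also doesn't exist, return the remaining element
--     # Assuming there's only one remaining element
--     for element in elements:
--         if element in specific_elements:
--             return element
--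
--     # In case no elements match (should not happen as per the problem statement)
--     return None
-- ===== SOURCE B (Python) =====
-- def check_and_return(elements):
--     specific = {"BDPACK-TR", "PACKLABEL", "TAPEREEL"}
--     saw_packlabel = False
--     first_specific = None
--     for element in elements:
--         if element not in specific:
--             return element
--         if element == "PACKLABEL":
--             saw_packlabel = True
--         elif first_specific is None:
--             first_specific = element
--     if saw_packlabel:
--         return "PACKLABEL"
--     return first_specific
-- ===== Notes on version B (the rewrite author's own statement) =====
-- stated objective: simpler
-- what changed: Fuses A's three scans (find non-specific, membership test for PACKLABEL, find first specific) into a single pass that tracks a seen-PACKLABEL flag and the first other specific element.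
import Mathlib
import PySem

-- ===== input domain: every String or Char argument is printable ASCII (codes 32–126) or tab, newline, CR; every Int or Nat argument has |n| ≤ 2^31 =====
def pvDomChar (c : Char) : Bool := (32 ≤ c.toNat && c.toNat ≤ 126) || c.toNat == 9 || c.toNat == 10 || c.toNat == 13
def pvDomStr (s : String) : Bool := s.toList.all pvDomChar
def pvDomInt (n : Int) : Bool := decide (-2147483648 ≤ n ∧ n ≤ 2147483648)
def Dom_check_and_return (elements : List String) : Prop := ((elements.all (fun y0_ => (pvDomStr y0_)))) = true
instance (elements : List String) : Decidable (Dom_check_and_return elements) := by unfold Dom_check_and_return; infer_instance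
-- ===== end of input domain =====

-- B fuses A's three scans into a single pass tracking a seen-PACKLABEL flag and the
-- first other specific element; objective: simpler (same O(n) cost).

-- ===== PORT A =====
def specificElementsA : List String := ["BDPACK-TR", "PACKLABEL", "TAPEREEL"]

-- first 'for' loop of A: return first element not in specific_elements
def caraLoop1 : List String → Option String
  | [] => none
  | e :: rest => if e ∉ specificElementsA then some e else caraLoop1 rest

-- second 'for' loop of A: return first element in specific_elements
def caraLoop2 : List String → Option String
  | [] => none
  | e :: rest => if e ∈ specificElementsA then some e else caraLoop2 rest

def check_and_return (elements : List String) : Option String :=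
  match caraLoop1 elements with
  | some e => some e
  | none =>
    if "PACKLABEL" ∈ elements then some "PACKLABEL"
    else
      match caraLoop2 elements with
      | some e => some e
      | none => none

-- ===== PORT B =====
def specificB : PySem.Set String := PySem.Set.ofList ["BDPACK-TR", "PACKLABEL", "TAPEREEL"]

-- B's single loop; state = (saw_packlabel, first_specific)
def carbLoop : List String → Bool → Option String → Option String
  | [], sawPack, firstSpec => if sawPack then some "PACKLABEL" else firstSpec
  | e :: rest, sawPack, firstSpec =>
    if ¬ (PySem.Set.contains specificB e) then some e
    else if e == "PACKLABEL" then carbLoop rest true firstSpec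
    else if firstSpec.isNone then carbLoop rest sawPack (some e)
    else carbLoop rest sawPack firstSpec

def check_and_return_alt (elements : List String) : Option String :=
  carbLoop elements false none

-- ===== PRECONDITION & SPEC =====
def Spec_check_and_return (elements : List String) (out : Option String) : Prop := out = check_and_return_alt elements
instance (elements : List String) (out : Option String) : Decidable (Spec_check_and_return elements out) := by unfold Spec_check_and_return; infer_instance

-- ===== CLAIM (what is proved, stated in full; the proofs are below) =====
def Claim_equal_check_and_return : Prop := ∀ (elements : List String), Dom_check_and_return elements → Spec_check_and_return elements (check_and_return elements)

-- ===== LEMMAS AND PROOFS =====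

-- the Set literal of B holds exactly A's list literal (its elements are distinct)
theorem specificB_eq : specificB = specificElementsA := by
  simp [specificB, specificElementsA, PySem.Set.ofList, PySem.Set.add, PySem.Set.contains, List.foldl]

-- if the first loop of A finds a non-specific element, B returns it regardless of state
theorem carbLoop_of_loop1_some (l : List String) (e : String) (h : caraLoop1 l = some e) :
    ∀ (saw : Bool) (fs : Option String), carbLoop l saw fs = some e := by
  induction l with
  | nil => simp [caraLoop1] at h
  | cons x rest ih =>
      intro saw fs
      by_cases hx : x ∈ specificElementsA
      · simp [caraLoop1, hx] at h
        by_cases hp : x == "PACKLABEL" <;>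
          simp [carbLoop, specificB_eq, hx, hp, ih h]
      · simp [caraLoop1, hx] at h
        subst h
        simp [carbLoop, specificB_eq, hx]

-- if every element is specific, B's loop reduces to the flag / first-capture rule
theorem carbLoop_of_all_specific (l : List String) (h : caraLoop1 l = none) :
    ∀ (saw : Bool) (fs : Option String),
      carbLoop l saw fs =
        if saw ∨ "PACKLABEL" ∈ l then some "PACKLABEL"
        else match fs with
          | some x => some x
          | none => l.head? := by
  induction l with
  | nil => intro saw fs; cases fs <;> simp [carbLoop]
  | cons x rest ih =>
      intro saw fs
      by_cases hx : x ∈ specificElementsA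
      · simp [caraLoop1, hx] at h
        by_cases hp : x = "PACKLABEL"
        · subst hp
          simp [carbLoop, specificB_eq, hx, ih h]
        · have hb : (x == "PACKLABEL") = false := by simp [hp]
          cases fs with
          | some y => simp [carbLoop, specificB_eq, hx, hb, ih h, Ne.symm hp]
          | none => simp [carbLoop, specificB_eq, hx, hb, ih h, Ne.symm hp]
      · simp [caraLoop1, hx] at h

-- with no PACKLABEL and every element specific, A's second loop is just head?
theorem caraLoop2_eq_head (l : List String) (h1 : caraLoop1 l = none) :
    caraLoop2 l = l.head? := by
  cases l with
  | nil => rfl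
  | cons x rest =>
      by_cases hx : x ∈ specificElementsA
      · simp [caraLoop2, hx]
      · simp [caraLoop1, hx] at h1

-- ===== VERDICT (by name: the statement is the Claim_ definition above) =====
theorem check_and_return_spec : Claim_equal_check_and_return := by
  intro elements _
  unfold Spec_check_and_return check_and_return check_and_return_alt
  cases h : caraLoop1 elements with
  | some e => simp [carbLoop_of_loop1_some elements e h]
  | none =>
      rw [carbLoop_of_all_specific elements h, caraLoop2_eq_head elements h]
      by_cases hp : "PACKLABEL" ∈ elements
      · simp [hp]
      · simp [hp]; cases elements.head? <;> rfl
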